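-- pv_equiv track=rewrite | github.com/jajcayn/pyclits | pyclits/cli_helpers.py | process_CLI_arguments
-- ===== SOURCE A (Python) =====
-- def process_CLI_arguments(arguments, separator=[",", "'", "/", "|"]):
--     processed_arguments = []
--     neu_set = []
--     for item in arguments:
--         if item in separator:
--             processed_arguments.append(neu_set)
--             neu_set = []
--         else:
--             neu_set.append(int(item))
--
--     processed_arguments.append(neu_set)
--     return processed_arguments
-- ===== SOURCE B (Python) =====
-- def process_CLI_arguments(arguments, separator=[",", "'", "/", "|"]):
--     arguments = list(arguments)
--     boundaries = [i for i, item in enumerate(arguments) if item in separator]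
--     groups = []
--     start = 0
--     for b in boundaries:
--         groups.append([int(x) for x in arguments[start:b]])
--         start = b + 1
--     groups.append([int(x) for x in arguments[start:]])
--     return groups
-- ===== Notes on version B (the rewrite author's own statement) =====
-- stated objective: alternative
-- what changed: Replaces the single in-place accumulator loop by a boundary-index table built once with enumerate, followed by slice-and-convert over consecutive boundary intervals.
import Mathlib
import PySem

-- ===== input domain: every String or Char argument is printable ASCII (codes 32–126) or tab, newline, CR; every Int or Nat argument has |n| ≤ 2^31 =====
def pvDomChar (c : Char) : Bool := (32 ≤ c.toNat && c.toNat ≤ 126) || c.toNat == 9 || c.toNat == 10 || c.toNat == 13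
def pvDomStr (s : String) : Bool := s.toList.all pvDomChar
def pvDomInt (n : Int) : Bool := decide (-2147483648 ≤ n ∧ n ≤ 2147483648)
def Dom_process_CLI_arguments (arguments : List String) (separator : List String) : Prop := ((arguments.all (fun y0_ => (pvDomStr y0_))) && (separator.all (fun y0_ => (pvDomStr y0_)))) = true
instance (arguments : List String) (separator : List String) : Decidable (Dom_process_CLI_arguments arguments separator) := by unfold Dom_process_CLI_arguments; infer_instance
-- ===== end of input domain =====

-- B replaces A's in-place accumulator loop by a boundary-index table (enumerate) plus slice-per-interval decomposition; same O(n) cost, alternative structure.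


-- ===== PORT A =====
-- int(item); Pre_ excludes the inputs where int() raises ValueError, so getD 0 is never the value used
def pvToInt (s : String) : Int := (PySem.Int.ofStr? s).getD 0

def process_CLI_arguments (arguments : List String) (separator : List String) : List (List Int) :=
  let st := arguments.foldl
    (fun (st : List (List Int) × List Int) item =>
      if item ∈ separator then (st.1 ++ [st.2], ([] : List Int))
      else (st.1, st.2 ++ [pvToInt item]))
    ([], [])
  st.1 ++ [st.2]

-- ===== PORT B =====
-- the for-loop over the boundary table, with the trailing tail-slice append
def pvGo (arguments : List String) (bs : List Int) (groups : List (List Int)) (start : Int) : List (List Int) :=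
  match bs with
  | [] => groups ++ [(PySem.List.slice arguments (some start) none).map pvToInt]
  | b :: rest => pvGo arguments rest (groups ++ [(PySem.List.slice arguments (some start) (some b)).map pvToInt]) (b + 1)

def process_CLI_arguments_alt (arguments : List String) (separator : List String) : List (List Int) :=
  let boundaries := (PySem.List.enumerate arguments).filterMap
    (fun p => if p.2 ∈ separator then some p.1 else none)
  pvGo arguments boundaries [] 0

-- ===== PRECONDITION & SPEC =====
-- Pre_ excludes exactly the inputs where Python A raises ValueError: a non-separator token that int() rejects
def Pre_process_CLI_arguments (arguments : List String) (separator : List String) : Prop :=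
  ∀ s ∈ arguments, s ∉ separator → (PySem.Int.ofStr? s).isSome = true
instance (arguments : List String) (separator : List String) : Decidable (Pre_process_CLI_arguments arguments separator) := by unfold Pre_process_CLI_arguments; infer_instance

def pvWitness_process_CLI_arguments : List String × List String := (["1", ",", "2", "3"], [","])

def Spec_process_CLI_arguments (arguments : List String) (separator : List String) (out : List (List Int)) : Prop := out = process_CLI_arguments_alt arguments separator
instance (arguments : List String) (separator : List String) (out : List (List Int)) : Decidable (Spec_process_CLI_arguments arguments separator out) := by unfold Spec_process_CLI_arguments; infer_instance

-- ===== CLAIM (what is proved, stated in full; the proofs are below) =====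
def Claim_equal_process_CLI_arguments : Prop := ∀ (arguments : List String) (separator : List String), Dom_process_CLI_arguments arguments separator → Pre_process_CLI_arguments arguments separator → Spec_process_CLI_arguments arguments separator (process_CLI_arguments arguments separator)

-- ===== LEMMAS AND PROOFS =====

-- common characterisation: the grouped result, by structural recursion
def pvSplit (sep : List String) : List String → List Int → List (List Int)
  | [], cur => [cur]
  | x :: xs, cur => if x ∈ sep then cur :: pvSplit sep xs [] else pvSplit sep xs (cur ++ [pvToInt x])

-- boundary indices of xs, counted from s
def pvBnds (sep : List String) (s : Int) : List String → List Int
  | [] => []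
  | x :: xs => if x ∈ sep then s :: pvBnds sep (s + 1) xs else pvBnds sep (s + 1) xs

lemma foldA_spec (sep : List String) : ∀ (xs : List String) (acc : List (List Int)) (cur : List Int),
    (xs.foldl (fun (st : List (List Int) × List Int) item =>
        if item ∈ sep then (st.1 ++ [st.2], ([] : List Int))
        else (st.1, st.2 ++ [pvToInt item])) (acc, cur)).1
      ++ [(xs.foldl (fun (st : List (List Int) × List Int) item =>
        if item ∈ sep then (st.1 ++ [st.2], ([] : List Int))
        else (st.1, st.2 ++ [pvToInt item])) (acc, cur)).2]
    = acc ++ pvSplit sep xs cur := by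
  intro xs
  induction xs with
  | nil => intro acc cur; simp [pvSplit]
  | cons x xs ih =>
    intro acc cur
    by_cases hx : x ∈ sep <;> simp [pvSplit, hx, ih, List.append_assoc]

lemma enum_bnds (sep : List String) : ∀ (xs : List String) (s : Int),
    (PySem.List.enumerate xs s).filterMap (fun p => if p.2 ∈ sep then some p.1 else none)
      = pvBnds sep s xs := by
  intro xs
  induction xs with
  | nil => intro s; simp [pvBnds, PySem.List.enumerate_nil]
  | cons x xs ih =>
    intro s
    by_cases hx : x ∈ sep <;>
      simp [PySem.List.enumerate_cons, hx, pvBnds, ih]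

lemma go_spec (sep : List String) : ∀ (xs mid pre : List String) (acc : List (List Int)),
    pvGo (pre ++ (mid ++ xs)) (pvBnds sep ((pre.length + mid.length : Nat) : Int) xs) acc ((pre.length : Nat) : Int)
      = acc ++ pvSplit sep xs (mid.map pvToInt) := by
  intro xs
  induction xs with
  | nil =>
    intro mid pre acc
    simp [pvBnds, pvGo, pvSplit, PySem.List.slice_from_natCast]
  | cons x xs ih =>
    intro mid pre acc
    by_cases hx : x ∈ sep
    · simp only [pvBnds, hx, if_pos, pvGo, pvSplit]
      have hsl : PySem.List.slice (pre ++ (mid ++ x :: xs)) (some ((pre.length : Nat) : Int))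
          (some ((pre.length + mid.length : Nat) : Int)) = mid := by
        rw [PySem.List.slice_natCast]
        simp
      have hstep : ((pre.length + mid.length : Nat) : Int) + 1
          = (((pre ++ (mid ++ [x])).length : Nat) : Int) := by
        simp; ring
      rw [hsl, hstep]
      have := ih [] (pre ++ (mid ++ [x])) (acc ++ [mid.map pvToInt])
      simp only [List.nil_append, List.length_append] at this ⊢
      have harr : (pre ++ (mid ++ [x])) ++ xs = pre ++ (mid ++ x :: xs) := by simp
      rw [harr] at this
      simp only [List.length_singleton, List.length_nil, Nat.add_zero, List.map_nil] at this ⊢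
      rw [this]
      simp
    · simp only [pvBnds, hx, if_neg, not_false_iff, pvSplit]
      have := ih (mid ++ [x]) pre acc
      have harr : pre ++ ((mid ++ [x]) ++ xs) = pre ++ (mid ++ x :: xs) := by simp
      rw [harr] at this
      have hlen : ((pre.length + (mid ++ [x]).length : Nat) : Int)
          = (((pre.length + mid.length : Nat) : Int) + 1) := by simp; ring
      rw [hlen] at this
      rw [this]
      simp

-- ===== VERDICT (by name: the statement is the Claim_ definition above) =====
theorem process_CLI_arguments_spec : Claim_equal_process_CLI_arguments := by
  intro arguments separator _ _
  unfold Spec_process_CLI_arguments process_CLI_arguments process_CLI_arguments_alt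
  rw [enum_bnds]
  have hB := go_spec separator arguments [] [] []
  simp only [List.nil_append, List.length_nil, Nat.cast_zero, List.map_nil, Nat.zero_add] at hB
  have hA := foldA_spec separator arguments [] []
  simp only [List.nil_append] at hA
  rw [hA, hB]
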